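-- pv_equiv track=rewrite | github.com/JintaoXIAO/algo-exercises | crossing-river-pawn.py | _helper
-- ===== SOURCE A (Python) =====
-- from typing import Tuple, List
--
-- def _killbyhorse(c: Tuple[int, int], h: Tuple[int, int]) -> bool:
--     x, y = h
--     return c in [h,
--                  (x - 2, y - 1),
--                  (x - 2, y + 1),
--                  (x + 2, y - 1),
--                  (x + 2, y + 1),
--                  (x - 1, y - 2),
--                  (x - 1, y + 2),
--                  (x + 1, y - 2),
--                  (x + 1, y + 2)]
--
-- def _helper(c: Tuple[int, int],  # current position
--             b: Tuple[int, int],  # final position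
--             h: Tuple[int, int],  # the horse position
--             visited: List[List[int]],
--             path: List[Tuple[int, int]],
--             paths: List[List[Tuple[int, int]]]) -> bool:
--     if c == b:
--         path.append(c)
--         paths.append(path)
--         return True
--     cx, cy = c
--     bx, by = b
--     if cx > bx or cy > by or visited[cx][cy] or _killbyhorse(c, h):
--         if cx <= bx and cy <= by:
--             visited[cx][cy] = True
--         return False
--     path.append(c)
--     p1 = _helper((cx + 1, cy), b, h, visited, path[:], paths)
--     p2 = _helper((cx, cy + 1), b, h, visited, path[:], paths)
--     if p1 or p2:
--         return True
--     visited[cx][cy] = True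
--     return False
-- ===== SOURCE B (Python) =====
-- def _killbyhorse(c, h):
--     x, y = h
--     return c in [h,
--                  (x - 2, y - 1), (x - 2, y + 1),
--                  (x + 2, y - 1), (x + 2, y + 1),
--                  (x - 1, y - 2), (x - 1, y + 2),
--                  (x + 1, y - 2), (x + 1, y + 2)]
--
-- def _helper(c, b, h, visited, path, paths):
--     # Bottom-up reachability table over the rectangle [cx..bx] x [cy..by], one
--     # boolean row at a time, instead of memoized DFS with per-call path copying.
--     # Return-value equivalent to the recursive version; it does not mark failed
--     # cells in visited and fills paths only on a direct hit (c == b).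
--     if c == b:
--         path.append(c)
--         paths.append(path)
--         return True
--     cx, cy = c
--     bx, by = b
--     if cx > bx or cy > by:
--         return False
--     width = by - cy + 2
--     nxt = [False] * width          # row bx + 1: nothing is reachable from below
--     for x in range(bx, cx - 1, -1):
--         cur = [False] * width      # cur[width-1] stays False: column by + 1
--         for y in range(by, cy - 1, -1):
--             j = y - cy
--             if x == bx and y == by:
--                 cur[j] = True
--             elif visited[x][y] or _killbyhorse((x, y), h):
--                 cur[j] = False
--             else:
--                 cur[j] = nxt[j] or cur[j + 1]
--         nxt = cur
--     return nxt[0]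
-- ===== Notes on version B (the rewrite author's own statement) =====
-- stated objective: alternative
-- what changed: B replaces the memoized recursive DFS, which copies the growing path list on every call, by an iterative bottom-up reachability table over the rectangle between start and target, kept as one boolean row at a time (measured about 1.2x A at the largest timing size, so not claimed as faster).
-- outside the precondition, e.g. on _helper((0, 0), (1, 1), (), [[1, 1], [1, 1]], [], []): A returns False, B returns False; on _helper((-2, 0), (0, 0), (5, 5), [[0], [0]], [], []): A returns True, B returns True
import Mathlib
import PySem

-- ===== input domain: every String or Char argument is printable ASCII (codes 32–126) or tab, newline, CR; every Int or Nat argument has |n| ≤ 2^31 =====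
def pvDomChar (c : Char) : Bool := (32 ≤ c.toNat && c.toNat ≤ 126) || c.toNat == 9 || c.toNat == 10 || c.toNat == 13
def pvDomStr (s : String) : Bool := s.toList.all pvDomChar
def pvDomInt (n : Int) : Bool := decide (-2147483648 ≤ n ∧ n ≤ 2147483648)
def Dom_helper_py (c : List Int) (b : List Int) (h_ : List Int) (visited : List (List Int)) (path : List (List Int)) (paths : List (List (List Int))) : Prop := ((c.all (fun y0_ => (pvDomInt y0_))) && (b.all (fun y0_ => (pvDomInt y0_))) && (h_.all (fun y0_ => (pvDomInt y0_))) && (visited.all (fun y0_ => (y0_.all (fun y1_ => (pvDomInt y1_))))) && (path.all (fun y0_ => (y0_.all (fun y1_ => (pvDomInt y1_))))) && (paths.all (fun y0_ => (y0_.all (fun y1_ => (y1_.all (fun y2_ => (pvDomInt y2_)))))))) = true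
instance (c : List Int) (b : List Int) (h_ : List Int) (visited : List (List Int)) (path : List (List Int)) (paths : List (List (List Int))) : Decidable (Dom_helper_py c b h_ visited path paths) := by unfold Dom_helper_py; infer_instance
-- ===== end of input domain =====

-- B computes the same answer by a bottom-up reachability table over the rectangle (one boolean
-- row at a time) instead of A's memoized DFS with per-call path copying.  A mutates
-- visited/path/paths in place; the equivalence proved here is about the RETURN VALUE only.

-- ===== PORT A =====
-- positions are arity-2 tuples, modelled as 2-element lists (the type convention of this task);
-- _killbyhorse's 9-candidate membership test, unrolled (exact for 2-element positions).
def killbh (c h : List Int) : Bool :=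
  let x := h.getD 0 0
  let y := h.getD 1 0
  c = h ∨ c = [x - 2, y - 1] ∨ c = [x - 2, y + 1] ∨ c = [x + 2, y - 1] ∨ c = [x + 2, y + 1] ∨
    c = [x - 1, y - 2] ∨ c = [x - 1, y + 2] ∨ c = [x + 1, y - 2] ∨ c = [x + 1, y + 2]

-- visited[x][y] read and `visited[x][y] = True` write; exact under Pre_ (nonnegative, in-range indices).
def vget (v : List (List Int)) (x y : Int) : Int := (v.getD x.toNat []).getD y.toNat 0
def vset (v : List (List Int)) (x y : Int) : List (List Int) :=
  v.set x.toNat ((v.getD x.toNat []).set y.toNat 1)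

-- _helper, with visited and paths threaded as state (they are mutated in place in Python) and
-- the fuel argument only making the recursion total (the wrapper below always supplies enough;
-- each recursive call shrinks the taxicab distance to b, which bounds the depth).
def goA : Nat → List Int → List Int → List Int → List (List Int) → List (List Int) →
    List (List (List Int)) → (Bool × List (List Int) × List (List (List Int)))
  | 0, _, _, _, v, _, ps => (false, v, ps)
  | (f + 1), c, b, h, v, path, ps =>
    if c = b then (true, v, ps ++ [path ++ [c]])
    else
      let cx := c.getD 0 0
      let cy := c.getD 1 0
      let bx := b.getD 0 0
      let by_ := b.getD 1 0
      if bx < cx ∨ by_ < cy ∨ vget v cx cy ≠ 0 ∨ killbh c h = true then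
        (false, if cx ≤ bx ∧ cy ≤ by_ then vset v cx cy else v, ps)
      else
        let path1 := path ++ [c]
        let r1 := goA f [cx + 1, cy] b h v path1 ps
        let r2 := goA f [cx, cy + 1] b h r1.2.1 path1 r1.2.2
        if r1.1 ∨ r2.1 then (true, r2.2.1, r2.2.2)
        else (false, vset r2.2.1 cx cy, r2.2.2)

def helper_py (c : List Int) (b : List Int) (h_ : List Int) (visited : List (List Int)) (path : List (List Int)) (paths : List (List (List Int))) : Bool :=
  (goA (((b.getD 0 0 - c.getD 0 0) + (b.getD 1 0 - c.getD 1 0)).toNat + 2)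
    c b h_ visited path paths).1

-- ===== PORT B =====
-- the value written into cur[y - cy] for cell (x, y) (Source B's inner-loop body)
def altCell (bx by_ cy : Int) (visited : List (List Int)) (h_ : List Int)
    (nxt cur : List Bool) (x y : Int) : Bool :=
  if x = bx ∧ y = by_ then true
  else if vget visited x y ≠ 0 ∨ killbh [x, y] h_ = true then false
  else nxt.getD (y - cy).toNat false || cur.getD ((y - cy).toNat + 1) false

-- one row of the table: Source B's inner `for y in range(by, cy - 1, -1)` loop
def altInner (bx by_ cy : Int) (visited : List (List Int)) (h_ : List Int)
    (nxt : List Bool) (x : Int) : List Bool :=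
  (PySem.List.pyRange by_ (cy - 1) (-1)).foldl
    (fun cur y => cur.set (y - cy).toNat (altCell bx by_ cy visited h_ nxt cur x y))
    (List.replicate (by_ - cy + 2).toNat false)

def helper_py_alt (c : List Int) (b : List Int) (h_ : List Int) (visited : List (List Int)) (path : List (List Int)) (paths : List (List (List Int))) : Bool :=
  if c = b then true
  else
    let cx := c.getD 0 0
    let cy := c.getD 1 0
    let bx := b.getD 0 0
    let by_ := b.getD 1 0
    if bx < cx ∨ by_ < cy then false
    else
      ((PySem.List.pyRange bx (cx - 1) (-1)).foldl
          (fun nxt x => altInner bx by_ cy visited h_ nxt x)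
          (List.replicate (by_ - cy + 2).toNat false)).getD 0 false

-- ===== PRECONDITION & SPEC =====
-- Pre_ excludes inputs where A raises (positions or horse not 2-tuples hit an unpacking
-- ValueError; a visited grid smaller than the searched rectangle raises IndexError) and,
-- conservatively via the same shape conditions, a few inputs where short-circuiting or an
-- already-blocked start lets A return False despite a malformed horse, a negative start
-- coordinate (index wraparound) or a too-small grid (see the cites in the claim).
def Pre_helper_py (c : List Int) (b : List Int) (h_ : List Int) (visited : List (List Int)) (path : List (List Int)) (paths : List (List (List Int))) : Prop :=
  c = b ∨ (c.length = 2 ∧ b.length = 2 ∧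
    (b.getD 0 0 < c.getD 0 0 ∨ b.getD 1 0 < c.getD 1 0 ∨
      (0 ≤ c.getD 0 0 ∧ 0 ≤ c.getD 1 0 ∧ h_.length = 2 ∧
       b.getD 0 0 < (visited.length : Int) ∧
       ∀ row ∈ visited, b.getD 1 0 < (row.length : Int))))
instance (c : List Int) (b : List Int) (h_ : List Int) (visited : List (List Int)) (path : List (List Int)) (paths : List (List (List Int))) : Decidable (Pre_helper_py c b h_ visited path paths) := by unfold Pre_helper_py; infer_instance

def pvWitness_helper_py : List Int × List Int × List Int × List (List Int) × List (List Int) × List (List (List Int)) :=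
  ([0, 0], [2, 2], [5, 5], [[0, 0, 0], [0, 1, 0], [0, 0, 0]], [], [])

def Spec_helper_py (c : List Int) (b : List Int) (h_ : List Int) (visited : List (List Int)) (path : List (List Int)) (paths : List (List (List Int))) (out : Bool) : Prop := out = helper_py_alt c b h_ visited path paths
instance (c : List Int) (b : List Int) (h_ : List Int) (visited : List (List Int)) (path : List (List Int)) (paths : List (List (List Int))) (out : Bool) : Decidable (Spec_helper_py c b h_ visited path paths out) := by unfold Spec_helper_py; infer_instance

-- ===== CLAIM (what is proved, stated in full; the proofs are below) =====
def Claim_equal_helper_py : Prop := ∀ (c : List Int) (b : List Int) (h_ : List Int) (visited : List (List Int)) (path : List (List Int)) (paths : List (List (List Int))), Dom_helper_py c b h_ visited path paths → Pre_helper_py c b h_ visited path paths → Spec_helper_py c b h_ visited path paths (helper_py c b h_ visited path paths)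

-- ===== LEMMAS AND PROOFS =====

-- the mathematical description both ports are reduced to: a monotone (right/down) path from
-- (x, y) to (b0, b1) through cells that are neither marked in v0 nor attacked by the horse
def hP (b0 b1 : Int) (v0 : List (List Int)) (h : List Int) (x y : Int) : Bool :=
  if x = b0 ∧ y = b1 then true
  else if b0 < x ∨ b1 < y then false
  else if vget v0 x y ≠ 0 ∨ killbh [x, y] h = true then false
  else hP b0 b1 v0 h (x + 1) y || hP b0 b1 v0 h x (y + 1)
termination_by ((b0 - x) + (b1 - y)).toNat
decreasing_by all_goals omega

theorem hP_eq (b0 b1 : Int) (v0 : List (List Int)) (h : List Int) (x y : Int) :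
    hP b0 b1 v0 h x y =
      if x = b0 ∧ y = b1 then true
      else if b0 < x ∨ b1 < y then false
      else if vget v0 x y ≠ 0 ∨ killbh [x, y] h = true then false
      else hP b0 b1 v0 h (x + 1) y || hP b0 b1 v0 h x (y + 1) := by
  rw [hP]

theorem getD_set_self {α : Type} (l : List α) (i : Nat) (a d : α) (h : i < l.length) :
    (l.set i a).getD i d = a := by simp [List.getD, h]

theorem getD_set_ne {α : Type} (l : List α) (i j : Nat) (a d : α) (h : i ≠ j) :
    (l.set i a).getD j d = l.getD j d := by simp [List.getD, List.getElem?_set_ne h]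

theorem getD_mem (l : List (List Int)) (i : Nat) (h : i < l.length) : l.getD i [] ∈ l := by
  rw [List.getD_eq_getElem l [] h]
  exact List.getElem_mem h

theorem vget_vset (v : List (List Int)) (x y a b : Int)
    (hx : x.toNat < v.length) (hy : y.toNat < (v.getD x.toNat []).length) :
    vget (vset v x y) a b =
      if a.toNat = x.toNat ∧ b.toNat = y.toNat then 1 else vget v a b := by
  unfold vget vset
  by_cases hax : a.toNat = x.toNat
  · rw [hax, getD_set_self _ _ _ _ hx]
    by_cases hby : b.toNat = y.toNat
    · rw [hby, getD_set_self _ _ _ _ hy]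
      simp [hax, hby]
    · rw [getD_set_ne _ _ _ _ _ (Ne.symm hby)]
      simp [hax, hby]
  · rw [getD_set_ne _ _ _ _ _ (Ne.symm hax)]
    simp [hax]

-- invariant maintained by A's visited-marking: marks only grow, and every mark not present in
-- the initial grid sits on a cell from which no path exists
def MarkInv (b0 b1 : Int) (v0 : List (List Int)) (h : List Int) (v : List (List Int)) : Prop :=
  v.length = v0.length ∧
  (∀ i : Nat, (v.getD i []).length = (v0.getD i []).length) ∧
  (∀ x y : Int, vget v0 x y ≠ 0 → vget v x y ≠ 0) ∧
  (∀ x y : Int, 0 ≤ x → 0 ≤ y → vget v x y ≠ 0 →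
      vget v0 x y ≠ 0 ∨ hP b0 b1 v0 h x y = false)

theorem MarkInv_refl (b0 b1 : Int) (v0 : List (List Int)) (h : List Int) : MarkInv b0 b1 v0 h v0 :=
  ⟨rfl, fun _ => rfl, fun _ _ hv => hv, fun _ _ _ _ hv => Or.inl hv⟩

theorem MarkInv_mark (b0 b1 : Int) (v0 : List (List Int)) (h : List Int) (v : List (List Int))
    (hInv : MarkInv b0 b1 v0 h v) (x y : Int) (hx : 0 ≤ x) (hy : 0 ≤ y)
    (hxb : x ≤ b0) (hyb : y ≤ b1)
    (hlen : b0 < (v0.length : Int)) (hrow : ∀ row ∈ v0, b1 < (row.length : Int))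
    (hfalse : hP b0 b1 v0 h x y = false) :
    MarkInv b0 b1 v0 h (vset v x y) := by
  obtain ⟨h1, h2, h3, h4⟩ := hInv
  have hxr : x.toNat < v.length := by omega
  have hyr : y.toNat < (v.getD x.toNat []).length := by
    have hmem : v0.getD x.toNat [] ∈ v0 := getD_mem _ _ (by omega)
    have := hrow _ hmem
    have := h2 x.toNat
    omega
  refine ⟨by simp [vset, h1], ?_, ?_, ?_⟩
  · intro i
    by_cases hi : x.toNat = i
    · subst hi
      unfold vset
      rw [getD_set_self _ _ _ _ hxr, List.length_set]
      exact h2 x.toNat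
    · unfold vset
      rw [getD_set_ne _ _ _ _ _ hi]
      exact h2 i
  · intro a b hv0
    rw [vget_vset _ _ _ _ _ hxr hyr]
    split
    · simp
    · exact h3 a b hv0
  · intro a b ha hb hv
    rw [vget_vset _ _ _ _ _ hxr hyr] at hv
    by_cases hab : a.toNat = x.toNat ∧ b.toNat = y.toNat
    · have hax : a = x := by omega
      have hby : b = y := by omega
      right
      rw [hax, hby]
      exact hfalse
    · rw [if_neg hab] at hv
      exact h4 a b ha hb hv

-- fuel that suffices for goA starting at (x, y)
def mfun (b0 b1 x y : Int) : Nat :=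
  if b0 < x ∨ b1 < y then 1 else ((b0 - x) + (b1 - y)).toNat + 2

theorem list2_eq (a b c d : Int) : ([a, b] = [c, d]) ↔ (a = c ∧ b = d) := by simp

-- A's recursion computes hP and maintains the invariant (soundness of the failure memoization)
theorem goA_memo (b0 b1 : Int) (h : List Int) (v0 : List (List Int))
    (hlen : b0 < (v0.length : Int)) (hrow : ∀ row ∈ v0, b1 < (row.length : Int)) :
    ∀ (f : Nat) (x y : Int) (v : List (List Int)) (path : List (List Int))
      (ps : List (List (List Int))),
      mfun b0 b1 x y ≤ f → 0 ≤ x → 0 ≤ y → MarkInv b0 b1 v0 h v →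
      (goA f [x, y] [b0, b1] h v path ps).1 = hP b0 b1 v0 h x y ∧
      MarkInv b0 b1 v0 h (goA f [x, y] [b0, b1] h v path ps).2.1 := by
  intro f
  induction f with
  | zero =>
    intro x y v path ps hm hx hy hInv
    exfalso
    unfold mfun at hm
    split at hm <;> omega
  | succ f ih =>
    intro x y v path ps hm hx hy hInv
    have hlv : v.length = v0.length := hInv.1
    by_cases htgt : x = b0 ∧ y = b1
    · have hc : ([x, y] : List Int) = [b0, b1] := by rw [htgt.1, htgt.2]
      simp only [goA, hc, if_pos rfl]
      rw [hP_eq, if_pos htgt]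
      exact ⟨rfl, hInv⟩
    · have hc : ¬ ([x, y] : List Int) = [b0, b1] := by
        rw [list2_eq]; exact htgt
      simp only [goA, if_neg hc, List.getD_cons_zero, List.getD_cons_succ]
      by_cases hguard : b0 < x ∨ b1 < y ∨ vget v x y ≠ 0 ∨ killbh [x, y] h = true
      · rw [if_pos hguard]
        have hPfalse : hP b0 b1 v0 h x y = false := by
          rw [hP_eq, if_neg htgt]
          rcases hguard with hg | hg | hg | hg
          · rw [if_pos (Or.inl hg)]
          · rw [if_pos (Or.inr hg)]
          · by_cases hr : b0 < x ∨ b1 < y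
            · rw [if_pos hr]
            · rw [if_neg hr]
              rcases hInv.2.2.2 x y hx hy hg with h0 | h0
              · rw [if_pos (Or.inl h0)]
              · have he := hP_eq b0 b1 v0 h x y
                rw [if_neg htgt, if_neg hr] at he
                rw [← he]
                exact h0
          · by_cases hr : b0 < x ∨ b1 < y
            · rw [if_pos hr]
            · rw [if_neg hr, if_pos (Or.inr hg)]
        refine ⟨hPfalse.symm, ?_⟩
        by_cases hin : x ≤ b0 ∧ y ≤ b1
        · rw [if_pos hin]
          exact MarkInv_mark b0 b1 v0 h v hInv x y hx hy hin.1 hin.2 hlen hrow hPfalse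
        · rw [if_neg hin]
          exact hInv
      · rw [if_neg hguard]
        push_neg at hguard
        obtain ⟨hxb, hyb, hv0', hkill⟩ := hguard
        have hs : 1 ≤ (b0 - x) + (b1 - y) := by omega
        have hm1 : mfun b0 b1 (x + 1) y ≤ f := by
          unfold mfun at hm ⊢
          rw [if_neg (by omega : ¬(b0 < x ∨ b1 < y))] at hm
          split <;> omega
        have ih1 := ih (x + 1) y v (path ++ [[x, y]]) ps hm1 (by omega) hy hInv
        have hm2 : mfun b0 b1 x (y + 1) ≤ f := by
          unfold mfun at hm ⊢
          rw [if_neg (by omega : ¬(b0 < x ∨ b1 < y))] at hm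
          split <;> omega
        have ih2 := ih x (y + 1)
          (goA f [x + 1, y] [b0, b1] h v (path ++ [[x, y]]) ps).2.1 (path ++ [[x, y]])
          (goA f [x + 1, y] [b0, b1] h v (path ++ [[x, y]]) ps).2.2
          hm2 hx (by omega) ih1.2
        have hPx : hP b0 b1 v0 h x y =
            (hP b0 b1 v0 h (x + 1) y || hP b0 b1 v0 h x (y + 1)) := by
          rw [hP_eq, if_neg htgt, if_neg (by omega : ¬(b0 < x ∨ b1 < y))]
          rw [if_neg ?_]
          intro hcon
          rcases hcon with hcon | hcon
          · exact hInv.2.2.1 x y hcon hv0'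
          · exact hkill hcon
        by_cases hres :
            (goA f [x + 1, y] [b0, b1] h v (path ++ [[x, y]]) ps).1 = true ∨
            (goA f [x, y + 1] [b0, b1] h
              (goA f [x + 1, y] [b0, b1] h v (path ++ [[x, y]]) ps).2.1 (path ++ [[x, y]])
              (goA f [x + 1, y] [b0, b1] h v (path ++ [[x, y]]) ps).2.2).1 = true
        · rw [if_pos hres]
          constructor
          · rw [hPx, ← ih1.1, ← ih2.1]
            rcases hres with hr | hr <;> simp [hr]
          · exact ih2.2
        · rw [if_neg hres]
          push_neg at hres
          have hb1 : (goA f [x + 1, y] [b0, b1] h v (path ++ [[x, y]]) ps).1 = false :=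
            Bool.eq_false_iff.mpr (fun hcon => hres.1 hcon)
          have hb2 : (goA f [x, y + 1] [b0, b1] h
              (goA f [x + 1, y] [b0, b1] h v (path ++ [[x, y]]) ps).2.1 (path ++ [[x, y]])
              (goA f [x + 1, y] [b0, b1] h v (path ++ [[x, y]]) ps).2.2).1 = false :=
            Bool.eq_false_iff.mpr (fun hcon => hres.2 hcon)
          have hPfalse : hP b0 b1 v0 h x y = false := by
            rw [hPx, ← ih1.1, ← ih2.1, hb1, hb2]
            rfl
          exact ⟨hPfalse.symm, MarkInv_mark b0 b1 v0 h _ ih2.2 x y hx hy hxb hyb hlen hrow hPfalse⟩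

-- ---- B side: the table computes hP ----

-- specification of one finished row of the table
def rowSpec (b0 b1 c1 : Int) (v0 : List (List Int)) (h_ : List Int) (x : Int)
    (l : List Bool) : Prop :=
  l.length = (b1 - c1 + 2).toNat ∧
  ∀ j : Nat, (j : Int) < b1 - c1 + 2 →
    l.getD j false = if c1 + j ≤ b1 then hP b0 b1 v0 h_ x (c1 + j) else false

theorem rowSpec_init (b0 b1 c1 : Int) (v0 : List (List Int)) (h_ : List Int) (x : Int)
    (hx : b0 < x) :
    rowSpec b0 b1 c1 v0 h_ x (List.replicate (b1 - c1 + 2).toNat false) := by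
  refine ⟨by simp, ?_⟩
  intro j hj
  rw [List.getD, List.getElem?_replicate]
  have : j < (b1 - c1 + 2).toNat := by omega
  simp only [this, if_pos]
  split
  · rw [hP_eq, if_neg (by omega), if_pos (Or.inl hx)]
    rfl
  · rfl

theorem innerFold (b0 b1 c1 : Int) (v0 : List (List Int)) (h_ : List Int)
    (hc1 : c1 ≤ b1) (x : Int) (hxb : x ≤ b0)
    (nxt : List Bool) (hnxt : rowSpec b0 b1 c1 v0 h_ (x + 1) nxt) :
    ∀ (n : Nat) (cur : List Bool), (n : Int) ≤ b1 - c1 + 1 →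
      cur.length = (b1 - c1 + 2).toNat →
      (∀ j : Nat, (j : Int) < b1 - c1 + 2 →
        cur.getD j false =
          if c1 + n ≤ c1 + j ∧ c1 + j ≤ b1 then hP b0 b1 v0 h_ x (c1 + j) else false) →
      rowSpec b0 b1 c1 v0 h_ x
        (List.foldl
          (fun cur y => cur.set (y - c1).toNat (altCell b0 b1 c1 v0 h_ nxt cur x y))
          cur (PySem.List.pyRange (c1 + n - 1) (c1 - 1) (-1))) := by
  intro n
  induction n with
  | zero =>
    intro cur _ hlen hcur
    rw [show c1 + (0 : Nat) - 1 = c1 - 1 by push_cast; ring,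
      PySem.List.pyRange_neg_one_eq_nil (le_refl _), List.foldl_nil]
    refine ⟨hlen, ?_⟩
    intro j hj
    rw [hcur j hj]
    split_ifs with h1 h2 h2 <;> first | rfl | omega
  | succ n ihn =>
    intro cur hn hlen hcur
    have hstep : c1 + ((n + 1 : Nat) : Int) - 1 = c1 + n := by push_cast; ring
    rw [hstep, PySem.List.pyRange_neg_one_cons (by omega : c1 - 1 < c1 + n)]
    rw [List.foldl_cons]
    have hidx : ((c1 + (n : Int)) - c1).toNat = n := by omega
    have hnlt : n < (b1 - c1 + 2).toNat := by omega
    refine ihn (cur.set ((c1 + (n : Int)) - c1).toNat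
        (altCell b0 b1 c1 v0 h_ nxt cur x (c1 + n)))
      (by omega) (by simp [hlen]) ?_
    intro j hj
    by_cases hjn : j = n
    · subst hjn
      rw [hidx, getD_set_self _ _ _ _ (by omega)]
      have hcj : c1 + (j : Int) ≤ b1 := by omega
      rw [if_pos ⟨by omega, hcj⟩]
      unfold altCell
      rw [hP_eq]
      by_cases htgt : x = b0 ∧ c1 + (j : Int) = b1
      · rw [if_pos htgt, if_pos htgt]
      · rw [if_neg htgt, if_neg htgt, if_neg (by omega : ¬(b0 < x ∨ b1 < c1 + (j : Int)))]
        split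
        · rfl
        · -- unblocked: combine the two neighbours
          have hnj := hnxt.2 j hj
          rw [if_pos hcj] at hnj
          rw [hidx, hnj]
          have hj1 : ((j + 1 : Nat) : Int) < b1 - c1 + 2 := by omega
          have hcj1 := hcur (j + 1) hj1
          by_cases hend : c1 + ((j + 1 : Nat) : Int) ≤ b1
          · rw [if_pos ⟨by push_cast; omega, hend⟩] at hcj1
            rw [hcj1]
            congr 1
            push_cast
            ring_nf
          · rw [if_neg (by push_cast at hend ⊢; omega)] at hcj1
            rw [hcj1]
            have : hP b0 b1 v0 h_ x (c1 + (j : Int) + 1) = false := by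
              rw [hP_eq, if_neg (by omega), if_pos (by omega : b0 < x ∨ b1 < c1 + (j:Int) + 1)]
            rw [this]
    · rw [hidx, getD_set_ne _ _ _ _ _ (fun hh => hjn hh.symm)]
      rw [hcur j hj]
      split_ifs with h1 h2 h2 <;> first | rfl | omega

theorem outerFold (b0 b1 c0 c1 : Int) (v0 : List (List Int)) (h_ : List Int)
    (hc1 : c1 ≤ b1) :
    ∀ (n : Nat) (nxt : List Bool), c0 + (n : Int) ≤ b0 + 1 →
      rowSpec b0 b1 c1 v0 h_ (c0 + n) nxt →
      rowSpec b0 b1 c1 v0 h_ c0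
        (List.foldl (fun nxt x => altInner b0 b1 c1 v0 h_ nxt x) nxt
          (PySem.List.pyRange (c0 + n - 1) (c0 - 1) (-1))) := by
  intro n
  induction n with
  | zero =>
    intro nxt _ hnxt
    rw [show c0 + (0 : Nat) - 1 = c0 - 1 by push_cast; ring,
      PySem.List.pyRange_neg_one_eq_nil (le_refl _)]
    simpa using hnxt
  | succ n ihn =>
    intro nxt hn hnxt
    have hstep : c0 + ((n + 1 : Nat) : Int) - 1 = c0 + n := by push_cast; ring
    rw [hstep, PySem.List.pyRange_neg_one_cons (by omega : c0 - 1 < c0 + n)]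
    rw [List.foldl_cons]
    have hrow : rowSpec b0 b1 c1 v0 h_ (c0 + n) (altInner b0 b1 c1 v0 h_ nxt (c0 + n)) := by
      unfold altInner
      have hm : ((b1 - c1 + 1).toNat : Int) = b1 - c1 + 1 := by omega
      have hfold := innerFold b0 b1 c1 v0 h_ hc1 (c0 + n) (by omega) nxt
        (by rw [show c0 + (n : Int) + 1 = c0 + ((n + 1 : Nat) : Int) by push_cast; ring]
            exact hnxt)
        (b1 - c1 + 1).toNat (List.replicate (b1 - c1 + 2).toNat false)
        (by omega) (by simp) ?_
      · rw [show c1 + ((b1 - c1 + 1).toNat : Int) - 1 = b1 by omega] at hfold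
        exact hfold
      intro j hj
      rw [List.getD, List.getElem?_replicate]
      simp only [show j < (b1 - c1 + 2).toNat by omega, if_pos]
      rw [if_neg (by omega)]
      rfl
    have := ihn (altInner b0 b1 c1 v0 h_ nxt (c0 + n)) (by omega) hrow
    rw [show c0 + (n : Nat) - 1 = c0 + (n : Int) - 1 by push_cast; ring] at this
    exact this

-- ===== VERDICT (by name: the statement is the Claim_ definition above) =====
theorem helper_py_spec : Claim_equal_helper_py := by
  intro c b h_ visited path paths _ hpre
  unfold Spec_helper_py
  rcases hpre with hcb | ⟨hlc, hlb, hcase⟩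
  · -- c == b: both return True immediately
    subst hcb
    unfold helper_py helper_py_alt
    simp [goA]
  · obtain ⟨c0, c1, rfl⟩ := List.length_eq_two.mp hlc
    obtain ⟨b0, b1, rfl⟩ := List.length_eq_two.mp hlb
    simp only [List.getD_cons_zero, List.getD_cons_succ] at hcase
    by_cases hcb : ([c0, c1] : List Int) = [b0, b1]
    · unfold helper_py helper_py_alt
      simp [goA, hcb]
    · have hne : ¬(c0 = b0 ∧ c1 = b1) := by rw [list2_eq] at hcb; exact hcb
      by_cases hout : b0 < c0 ∨ b1 < c1
      · -- start already past the target: both return False without touching the grid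
        unfold helper_py helper_py_alt
        simp only [List.getD_cons_zero, List.getD_cons_succ]
        rw [if_neg hcb, if_pos hout]
        have : ((b0 - c0 + (b1 - c1)).toNat + 2) = ((b0 - c0 + (b1 - c1)).toNat + 1) + 1 := by
          omega
        rw [this]
        simp only [goA, if_neg hcb, List.getD_cons_zero, List.getD_cons_succ]
        rw [if_pos (by tauto : b0 < c0 ∨ b1 < c1 ∨ vget visited c0 c1 ≠ 0 ∨
          killbh [c0, c1] h_ = true)]
      · have hbounds : 0 ≤ c0 ∧ 0 ≤ c1 ∧ h_.length = 2 ∧ b0 < (visited.length : Int) ∧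
            ∀ row ∈ visited, b1 < (row.length : Int) := by tauto
        obtain ⟨hc0, hc1, _, hlen, hrow⟩ := hbounds
        push_neg at hout
        -- A side
        have hA : helper_py [c0, c1] [b0, b1] h_ visited path paths =
            hP b0 b1 visited h_ c0 c1 := by
          unfold helper_py
          simp only [List.getD_cons_zero, List.getD_cons_succ]
          have hm : mfun b0 b1 c0 c1 ≤ (b0 - c0 + (b1 - c1)).toNat + 2 := by
            unfold mfun
            rw [if_neg (by omega)]
          exact (goA_memo b0 b1 h_ visited hlen hrow _ c0 c1 visited path paths hm hc0 hc1
            (MarkInv_refl b0 b1 visited h_)).1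
        -- B side
        have hB : helper_py_alt [c0, c1] [b0, b1] h_ visited path paths =
            hP b0 b1 visited h_ c0 c1 := by
          unfold helper_py_alt
          rw [if_neg hcb]
          simp only [List.getD_cons_zero, List.getD_cons_succ]
          rw [if_neg (by omega : ¬(b0 < c0 ∨ b1 < c1))]
          have hfold := outerFold b0 b1 c0 c1 visited h_ (by omega)
            (b0 - c0 + 1).toNat (List.replicate (b1 - c1 + 2).toNat false)
            (by omega)
            (by rw [show c0 + ((b0 - c0 + 1).toNat : Int) = b0 + 1 by omega]
                exact rowSpec_init b0 b1 c1 visited h_ (b0 + 1) (by omega))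
          rw [show c0 + ((b0 - c0 + 1).toNat : Int) - 1 = b0 by omega] at hfold
          have h0 := hfold.2 0 (by omega)
          rw [if_pos (by omega : c1 + ((0 : Nat) : Int) ≤ b1)] at h0
          rw [h0]
          norm_num
        rw [hA, hB]
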